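-- pv_equiv track=rewrite | github.com/phillipbmartinez/python_exercises | python_exercises/Completed/18_buy_8_get_1_free_2.py | getCostOfCoffee
-- ===== SOURCE A (Python) =====
-- def getCostOfCoffee(numberOfCoffees, pricePerCoffee):
--     totalPrice = 0
--     cupsTillFreeCoffee = 8
--
--     while numberOfCoffees > 0:
--         numberOfCoffees -= 1
--
--         if cupsTillFreeCoffee == 0:
--             cupsTillFreeCoffee = 8
--         else:
--             totalPrice += pricePerCoffee
--             cupsTillFreeCoffee -= 1
--     return totalPrice
-- ===== SOURCE B (Python) =====
-- def getCostOfCoffee(numberOfCoffees, pricePerCoffee):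
--     n = max(numberOfCoffees, 0)
--     return (n - n // 9) * pricePerCoffee
-- ===== Notes on version B (the rewrite author's own statement) =====
-- stated objective: faster
-- what changed: Replaced the per-cup countdown loop (every 9th cup free) by the closed form paid = n - n//9, total = paid*price.
import Mathlib
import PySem

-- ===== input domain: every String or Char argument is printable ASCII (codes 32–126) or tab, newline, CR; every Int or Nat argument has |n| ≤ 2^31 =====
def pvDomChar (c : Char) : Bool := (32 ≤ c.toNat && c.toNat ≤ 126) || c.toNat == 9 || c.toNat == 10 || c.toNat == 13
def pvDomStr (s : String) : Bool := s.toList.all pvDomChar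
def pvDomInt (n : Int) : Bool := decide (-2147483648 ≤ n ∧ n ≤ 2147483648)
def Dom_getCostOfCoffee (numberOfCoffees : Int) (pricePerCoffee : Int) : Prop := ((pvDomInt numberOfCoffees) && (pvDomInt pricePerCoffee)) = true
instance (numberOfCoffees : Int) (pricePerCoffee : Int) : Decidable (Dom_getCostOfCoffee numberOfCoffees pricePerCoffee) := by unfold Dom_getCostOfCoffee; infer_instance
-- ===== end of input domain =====

-- B replaces A's per-cup countdown loop by the closed form paid = n - n//9; objective: faster (O(1) vs O(n)).

-- ===== PORT A =====
-- A's while loop: state (numberOfCoffees, cupsTillFreeCoffee, totalPrice)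
def getCostOfCoffeeLoop (numberOfCoffees : Int) (cupsTillFreeCoffee : Int) (totalPrice : Int) (pricePerCoffee : Int) : Int :=
  if _h : numberOfCoffees > 0 then
    let n' := numberOfCoffees - 1
    if cupsTillFreeCoffee = 0 then
      getCostOfCoffeeLoop n' 8 totalPrice pricePerCoffee
    else
      getCostOfCoffeeLoop n' (cupsTillFreeCoffee - 1) (totalPrice + pricePerCoffee) pricePerCoffee
  else totalPrice
termination_by numberOfCoffees.toNat
decreasing_by all_goals omega

def getCostOfCoffee (numberOfCoffees : Int) (pricePerCoffee : Int) : Int :=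
  getCostOfCoffeeLoop numberOfCoffees 8 0 pricePerCoffee

-- ===== PORT B =====
def getCostOfCoffee_alt (numberOfCoffees : Int) (pricePerCoffee : Int) : Int :=
  let n := max numberOfCoffees 0
  (n - PySem.Int.floordiv n 9) * pricePerCoffee

-- ===== PRECONDITION & SPEC =====
def Spec_getCostOfCoffee (numberOfCoffees : Int) (pricePerCoffee : Int) (out : Int) : Prop := out = getCostOfCoffee_alt numberOfCoffees pricePerCoffee
instance (numberOfCoffees : Int) (pricePerCoffee : Int) (out : Int) : Decidable (Spec_getCostOfCoffee numberOfCoffees pricePerCoffee out) := by unfold Spec_getCostOfCoffee; infer_instance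

-- ===== CLAIM (what is proved, stated in full; the proofs are below) =====
def Claim_equal_getCostOfCoffee : Prop := ∀ (numberOfCoffees : Int) (pricePerCoffee : Int), Dom_getCostOfCoffee numberOfCoffees pricePerCoffee → Spec_getCostOfCoffee numberOfCoffees pricePerCoffee (getCostOfCoffee numberOfCoffees pricePerCoffee)

-- ===== LEMMAS AND PROOFS =====
-- Loop invariant: with k coffees left and c ∈ [0,8] cups until the next free one,
-- the loop adds (k - (k + 8 - c)/9) * price to the accumulator.
theorem getCostOfCoffeeLoop_eq (k : Nat) : ∀ (c t p : Int), 0 ≤ c → c ≤ 8 →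
    getCostOfCoffeeLoop (k : Int) c t p = t + ((k : Int) - ((k : Int) + 8 - c) / 9) * p := by
  induction k with
  | zero =>
    intro c t p h0 h8
    rw [getCostOfCoffeeLoop]
    have h9 : ((8 : Int) - c) / 9 = 0 := by omega
    simp [h9]
  | succ k ih =>
    intro c t p h0 h8
    rw [getCostOfCoffeeLoop]
    have hpos : ((k + 1 : Nat) : Int) > 0 := by push_cast; omega
    rw [dif_pos hpos]
    have hn : ((k + 1 : Nat) : Int) - 1 = (k : Int) := by push_cast; ring
    by_cases hc : c = 0
    · rw [if_pos hc, hn, ih 8 t p (by omega) (by omega)]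
      subst hc
      have : ((k : Int) + 1 + 8 - 0) / 9 = (k : Int) / 9 + 1 := by omega
      push_cast
      rw [this]
      ring_nf
    · rw [if_neg hc, hn, ih (c - 1) (t + p) p (by omega) (by omega)]
      have : ((k : Int) + 8 - (c - 1)) = ((k : Int) + 1 + 8 - c) := by ring
      push_cast
      rw [this]
      ring_nf

-- ===== VERDICT (by name: the statement is the Claim_ definition above) =====
theorem getCostOfCoffee_spec : Claim_equal_getCostOfCoffee := by
  intro n p _
  unfold Spec_getCostOfCoffee getCostOfCoffee getCostOfCoffee_alt
  by_cases hn : 0 ≤ n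
  · obtain ⟨k, rfl⟩ := Int.eq_ofNat_of_zero_le hn
    rw [getCostOfCoffeeLoop_eq k 8 0 p (by omega) (by omega)]
    have hmax : max ((k : Nat) : Int) 0 = (k : Int) := by omega
    have hfd : PySem.Int.floordiv ((k : Nat) : Int) 9 = ((k : Nat) : Int) / 9 :=
      PySem.Int.floordiv_eq_ediv_of_pos (by omega : (0:Int) < 9)
    simp only [hmax, hfd]
    have : ((k : Int) + 8 - 8) = (k : Int) := by ring
    rw [this]
    ring
  · rw [getCostOfCoffeeLoop]
    rw [dif_neg (by omega)]
    have hmax : max n 0 = (0 : Int) := by omega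
    have hfd : PySem.Int.floordiv (0 : Int) 9 = 0 :=
      PySem.Int.floordiv_eq_ediv_of_pos (by omega : (0:Int) < 9)
    simp only [hmax, hfd]
    ring
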